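-- pv_equiv track=rewrite | github.com/Kimuksung/codewars-programmers | 파괴되지 않은 건물.py | solution
-- ===== SOURCE A (Python) =====
-- def solution(board, skill):
--     answer = 0
--
--     #누적합
--     n = len(board)
--     m = len(board[0])
--     mapping = [[0]*(m+1) for _ in range(n+1)]
--
--     for type,x1,y1,x2,y2,degree in skill:
--         mapping[x1][y1]+= -degree if type==1 else degree
--         mapping[x1][y2+1]+= degree if type==1 else -degree
--         mapping[x2+1][y1]+= degree if type==1 else -degree
--         mapping[x2+1][y2+1]+= -degree if type==1 else +degree
--
--     #row sum
--     for x in range(n):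
--         for y in range(1,m):
--             mapping[x][y]+=mapping[x][y-1]
--
--     #col sum
--     for y in range(m):
--         for x in range(1,n):
--             mapping[x][y]+=mapping[x-1][y]
--
--     for x in range(n):
--         for y in range(m):
--             board[x][y]+=mapping[x][y]
--             if board[x][y]>0:
--                 answer+=1
--
--     return answer
-- ===== SOURCE B (Python) =====
-- def solution(board, skill):
--     # Per-cell scan over the skills (no difference array, no prefix sums).
--     # Mutates board in place, like the original.
--     answer = 0
--     m = len(board[0])
--     for x, row in enumerate(board):
--         for y in range(m):
--             row[y] += sum(-d if t == 1 else d
--                           for t, x1, y1, x2, y2, d in skill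
--                           if x1 <= x <= x2 and y1 <= y <= y2)
--             if row[y] > 0:
--                 answer += 1
--     return answer
-- ===== Notes on version B (the rewrite author's own statement) =====
-- stated objective: simpler
-- what changed: Replaces the 2D difference array with its two prefix-sum passes by a direct per-cell sum of the applicable skill deltas, then counts positives in the same sweep.
-- outside the precondition, e.g. on solution([[1, 1], [1, 1], [1, 1]], [[2, 2, 0, 0, 1, 6]]): A returns 4, B returns 6; on solution([[1, 1], [1, 1], [1, 1]], [[1, -1, 0, 2, 1, 2]]): A returns 6, B returns 0
import Mathlib
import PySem

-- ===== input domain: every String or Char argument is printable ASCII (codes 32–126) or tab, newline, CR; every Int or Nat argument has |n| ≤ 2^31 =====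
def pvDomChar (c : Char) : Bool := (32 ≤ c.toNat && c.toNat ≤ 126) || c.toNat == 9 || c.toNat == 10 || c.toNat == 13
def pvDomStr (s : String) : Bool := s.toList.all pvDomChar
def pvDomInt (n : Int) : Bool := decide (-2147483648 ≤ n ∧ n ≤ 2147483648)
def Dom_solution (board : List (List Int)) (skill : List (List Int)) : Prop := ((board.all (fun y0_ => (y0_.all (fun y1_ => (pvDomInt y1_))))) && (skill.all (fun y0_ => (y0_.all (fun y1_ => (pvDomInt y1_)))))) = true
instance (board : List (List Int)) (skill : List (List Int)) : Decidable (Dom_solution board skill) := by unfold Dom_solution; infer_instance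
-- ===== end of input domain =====

-- B replaces A's 2D difference array and two prefix-sum passes by a direct per-cell sum of the
-- applicable skill deltas (objective: simpler; not faster). Both A and B mutate `board` in place
-- in Python; the equivalence proved here is about the RETURN value only (the mutations coincide
-- on Pre_ anyway).


-- ===== PORT A =====

-- cell read `g[x][y]` for Nat indices that A's own loops keep in range
def gcell (g : List (List Int)) (x y : Nat) : Int := (g.getD x []).getD y 0

-- Python `l[j] += d` / `g[i][j] += d` with negative-index wraparound; where Python would raise
-- IndexError (index out of range after wraparound) the list is returned unchanged -- those
-- inputs are excluded by Pre_solution.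
def pyRowAdd (row : List Int) (j d : Int) : List Int :=
  let j' : Int := if j < 0 then j + row.length else j
  if 0 ≤ j' ∧ j' < row.length then row.modify j'.toNat (· + d) else row

def pyGridAdd (g : List (List Int)) (i j d : Int) : List (List Int) :=
  let i' : Int := if i < 0 then i + g.length else i
  if 0 ≤ i' ∧ i' < g.length then g.modify i'.toNat (fun r => pyRowAdd r j d) else g

-- one iteration of A's skill loop (a row of `skill` that is not a sextuple raises ValueError
-- in Python -- excluded by Pre_solution; the port skips it)
def applySkillA (g : List (List Int)) (s : List Int) : List (List Int) :=
  match s with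
  | [t, x1, y1, x2, y2, deg] =>
    let g1 := pyGridAdd g x1 y1 (if t = 1 then -deg else deg)
    let g2 := pyGridAdd g1 x1 (y2 + 1) (if t = 1 then deg else -deg)
    let g3 := pyGridAdd g2 (x2 + 1) y1 (if t = 1 then deg else -deg)
    pyGridAdd g3 (x2 + 1) (y2 + 1) (if t = 1 then -deg else deg)
  | _ => g

def solution (board : List (List Int)) (skill : List (List Int)) : Int :=
  let n := board.length
  let m := (board.headD []).length
  let mapping0 : List (List Int) := List.replicate (n + 1) (List.replicate (m + 1) (0 : Int))
  let mapping1 := skill.foldl applySkillA mapping0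
  let mapping2 := (List.range n).foldl (fun g x =>
      (List.range' 1 (m - 1)).foldl
        (fun g y => g.modify x (fun r => r.modify y (· + gcell g x (y - 1)))) g) mapping1
  let mapping3 := (List.range m).foldl (fun g y =>
      (List.range' 1 (n - 1)).foldl
        (fun g x => g.modify x (fun r => r.modify y (· + gcell g (x - 1) y))) g) mapping2
  let fin := (List.range n).foldl (fun (st : List (List Int) × Int) x =>
      (List.range m).foldl (fun (st : List (List Int) × Int) y =>
        let b := st.1.modify x (fun r => r.modify y (· + gcell mapping3 x y))
        (b, if 0 < gcell b x y then st.2 + 1 else st.2)) st) (board, 0)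
  fin.2

-- ===== PORT B =====

-- sum(-d if t == 1 else d for t,x1,y1,x2,y2,d in skill if x1 <= x <= x2 and y1 <= y <= y2)
def deltaSum (skill : List (List Int)) (x y : Int) : Int :=
  skill.foldl (fun a s =>
    match s with
    | [t, x1, y1, x2, y2, d] =>
        if x1 ≤ x ∧ x ≤ x2 ∧ y1 ≤ y ∧ y ≤ y2 then a + (if t = 1 then -d else d) else a
    | _ => a) 0

def solution_alt (board : List (List Int)) (skill : List (List Int)) : Int :=
  let m := (board.headD []).length
  (PySem.List.enumerate board).foldl (fun (answer : Int) p =>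
    ((List.range m).foldl (fun (st : List Int × Int) y =>
        (st.1.modify y (· + deltaSum skill p.1 (y : Int)),
         if 0 < (st.1.modify y (· + deltaSum skill p.1 (y : Int))).getD y 0
         then st.2 + 1 else st.2))
      (p.2, answer)).2) 0

-- ===== PRECONDITION & SPEC =====

-- Pre_solution is the problem's stated input contract (nonempty board whose rows reach
-- len(board[0]) in length, and each skill a sextuple [type,x1,y1,x2,y2,degree] describing an
-- in-bounds rectangle with x1 <= x2, y1 <= y2).  Outside it A raises (empty board, short
-- rows/skills, out-of-range corners) -- except that A still returns a value for inverted
-- (x1 > x2 / y1 > y2) or negatively-indexed rectangles, where its difference-array corner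
-- updates land on accidental wrapped cells; those artefact corners are excluded here.
def Pre_solution (board : List (List Int)) (skill : List (List Int)) : Prop :=
  board ≠ [] ∧
  (∀ row ∈ board, (board.headD []).length ≤ row.length) ∧
  (∀ s ∈ skill, s.length = 6 ∧
    0 ≤ s.getD 1 0 ∧ s.getD 1 0 ≤ s.getD 3 0 ∧ s.getD 3 0 < (board.length : Int) ∧
    0 ≤ s.getD 2 0 ∧ s.getD 2 0 ≤ s.getD 4 0 ∧ s.getD 4 0 < ((board.headD []).length : Int))
instance (board : List (List Int)) (skill : List (List Int)) : Decidable (Pre_solution board skill) := by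
  unfold Pre_solution; infer_instance

def pvWitness_solution : List (List Int) × List (List Int) :=
  ([[1, 2], [3, -1]], [[1, 0, 0, 1, 1, 2], [2, 0, 1, 1, 1, 3]])

def Spec_solution (board : List (List Int)) (skill : List (List Int)) (out : Int) : Prop := out = solution_alt board skill
instance (board : List (List Int)) (skill : List (List Int)) (out : Int) : Decidable (Spec_solution board skill out) := by unfold Spec_solution; infer_instance

-- ===== CLAIM (what is proved, stated in full; the proofs are below) =====
def Claim_equal_solution : Prop := ∀ (board : List (List Int)) (skill : List (List Int)), Dom_solution board skill → Pre_solution board skill → Spec_solution board skill (solution board skill)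

-- ===== LEMMAS AND PROOFS =====

lemma getD_modify' {α : Type} (d : α) (l : List α) (i : Nat) (f : α → α) (j : Nat) :
    (l.modify i f).getD j d = if i = j ∧ j < l.length then f (l.getD j d) else l.getD j d := by
  simp only [List.getD, List.getElem?_modify]
  rcases Nat.lt_or_ge j l.length with h | h
  · simp [List.getElem?_eq_getElem h, h]
  · simp [List.getElem?_eq_none h, Nat.not_lt.mpr h]

lemma gcell_modify (g : List (List Int)) (i j : Nat) (f : Int → Int) (x y : Nat) :
    gcell (g.modify i (fun r => r.modify j f)) x y
      = if i = x ∧ x < g.length ∧ j = y ∧ y < (g.getD x []).length then f (gcell g x y) else gcell g x y := by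
  simp only [gcell, getD_modify' ([]) g i _ x]
  by_cases hx : i = x ∧ x < g.length
  · rw [if_pos hx, getD_modify' 0 (g.getD x []) j f y]
    by_cases hy : j = y ∧ y < (g.getD x []).length
    · rw [if_pos hy, if_pos ⟨hx.1, hx.2, hy.1, hy.2⟩]
    · rw [if_neg hy, if_neg (by tauto)]
  · rw [if_neg hx, if_neg (by tauto)]

def Rect (g : List (List Int)) (N M : Nat) : Prop :=
  g.length = N ∧ ∀ x : Nat, x < N → (g.getD x []).length = M

lemma length_pyRowAdd (row : List Int) (j d : Int) : (pyRowAdd row j d).length = row.length := by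
  simp only [pyRowAdd]
  split <;> split <;> first | exact List.length_modify .. | rfl

lemma Rect_modifyRow {g : List (List Int)} {N M : Nat} (h : Rect g N M) (x : Nat)
    (f : List Int → List Int) (hf : ∀ r, (f r).length = r.length) :
    Rect (g.modify x f) N M := by
  refine ⟨by simpa using h.1, fun i hi => ?_⟩
  rw [getD_modify' ([]) g x f i]
  split
  · rw [hf]; exact h.2 i hi
  · exact h.2 i hi

lemma gcell_pyGridAdd {g : List (List Int)} {N M : Nat} (h : Rect g N M)
    (i j d : Int) (hi : 0 ≤ i) (hi2 : i < (N : Int)) (hj : 0 ≤ j) (hj2 : j < (M : Int)) (x y : Nat) :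
    gcell (pyGridAdd g i j d) x y
      = if (x : Int) = i ∧ (y : Int) = j then gcell g x y + d else gcell g x y := by
  have hlen : g.length = N := h.1
  simp only [pyGridAdd]
  rw [if_neg (show ¬ i < 0 by omega)]
  rw [if_pos (show 0 ≤ i ∧ i < (g.length : Int) by omega)]
  have hpy : ∀ r : List Int, r.length = M → pyRowAdd r j d = r.modify j.toNat (· + d) := by
    intro r hr
    simp only [pyRowAdd]
    rw [if_neg (show ¬ j < 0 by omega)]
    rw [if_pos (show 0 ≤ j ∧ j < (r.length : Int) by omega)]
  have hmod : g.modify i.toNat (fun r => pyRowAdd r j d)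
      = g.modify i.toNat (fun r => r.modify j.toNat (· + d)) := by
    rcases Nat.lt_or_ge i.toNat g.length with hlt | hge
    · apply List.ext_getElem (by simp)
      intro k h1 h2
      rw [List.getElem_modify, List.getElem_modify]
      split
      · next heq =>
          rw [hpy]
          have := h.2 k (by omega)
          simpa [List.getD, List.getElem?_eq_getElem (show k < g.length by simpa using h2)] using this
      · rfl
    · rw [List.modify_eq_self hge, List.modify_eq_self hge]
  rw [hmod, gcell_modify]
  have hrowx : x < g.length → (g.getD x []).length = M := fun hx => h.2 x (by omega)
  by_cases hc : (x : Int) = i ∧ (y : Int) = j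
  · rw [if_pos hc, if_pos ⟨by omega, by omega, by omega, by rw [hrowx (by omega)]; omega⟩]
  · rw [if_neg hc, if_neg (by intro ⟨h1, h2, h3, h4⟩; exact hc ⟨by omega, by omega⟩)]

lemma Rect_pyGridAdd {g : List (List Int)} {N M : Nat} (h : Rect g N M) (i j d : Int) :
    Rect (pyGridAdd g i j d) N M := by
  simp only [pyGridAdd]
  split
  · split
    · exact Rect_modifyRow h _ _ (fun r => length_pyRowAdd r j d)
    · exact h
  · split
    · exact Rect_modifyRow h _ _ (fun r => length_pyRowAdd r j d)
    · exact h

def corner (s : List Int) (x y : Int) : Int :=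
  match s with
  | [t, x1, y1, x2, y2, d] =>
    (if x = x1 ∧ y = y1 then (if t = 1 then -d else d) else 0)
    + (if x = x1 ∧ y = y2 + 1 then -(if t = 1 then -d else d) else 0)
    + (if x = x2 + 1 ∧ y = y1 then -(if t = 1 then -d else d) else 0)
    + (if x = x2 + 1 ∧ y = y2 + 1 then (if t = 1 then -d else d) else 0)
  | _ => 0

def rectC (s : List Int) (x y : Int) : Int :=
  match s with
  | [t, x1, y1, x2, y2, d] =>
      if x1 ≤ x ∧ x ≤ x2 ∧ y1 ≤ y ∧ y ≤ y2 then (if t = 1 then -d else d) else 0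
  | _ => 0

def Csum (skill : List (List Int)) (x y : Int) : Int := (skill.map (fun s => corner s x y)).sum

def Fsum (skill : List (List Int)) (x y : Int) : Int := (skill.map (fun s => rectC s x y)).sum

def GoodSkill (skill : List (List Int)) (n m : Nat) : Prop :=
  ∀ s ∈ skill, s.length = 6 ∧
    0 ≤ s.getD 1 0 ∧ s.getD 1 0 ≤ s.getD 3 0 ∧ s.getD 3 0 < (n : Int) ∧
    0 ≤ s.getD 2 0 ∧ s.getD 2 0 ≤ s.getD 4 0 ∧ s.getD 4 0 < (m : Int)

lemma gcell_applySkillA {g : List (List Int)} {n m : Nat} (hR : Rect g (n + 1) (m + 1))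
    (t x1 y1 x2 y2 d : Int)
    (h1 : 0 ≤ x1) (h2 : x1 ≤ x2) (h3 : x2 < (n : Int))
    (h4 : 0 ≤ y1) (h5 : y1 ≤ y2) (h6 : y2 < (m : Int)) (x y : Nat) :
    gcell (applySkillA g [t, x1, y1, x2, y2, d]) x y
      = gcell g x y + corner [t, x1, y1, x2, y2, d] (x : Int) (y : Int) := by
  have hR1 := Rect_pyGridAdd hR x1 y1 (if t = 1 then -d else d)
  have hR2 := Rect_pyGridAdd hR1 x1 (y2 + 1) (if t = 1 then d else -d)
  have hR3 := Rect_pyGridAdd hR2 (x2 + 1) y1 (if t = 1 then d else -d)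
  simp only [applySkillA]
  rw [gcell_pyGridAdd hR3 _ _ _ (by omega) (by push_cast; omega) (by omega) (by push_cast; omega)]
  rw [gcell_pyGridAdd hR2 _ _ _ (by omega) (by push_cast; omega) (by omega) (by push_cast; omega)]
  rw [gcell_pyGridAdd hR1 _ _ _ (by omega) (by push_cast; omega) (by omega) (by push_cast; omega)]
  rw [gcell_pyGridAdd hR _ _ _ (by omega) (by push_cast; omega) (by omega) (by push_cast; omega)]
  simp only [corner]
  split_ifs <;> omega

lemma Rect_applySkillA {g : List (List Int)} {N M : Nat} (hR : Rect g N M) (s : List Int) :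
    Rect (applySkillA g s) N M := by
  unfold applySkillA
  match s with
  | [t, x1, y1, x2, y2, deg] =>
      exact Rect_pyGridAdd (Rect_pyGridAdd (Rect_pyGridAdd (Rect_pyGridAdd hR _ _ _) _ _ _) _ _ _) _ _ _
  | [] => exact hR
  | [a] => exact hR
  | [a,b] => exact hR
  | [a,b,c] => exact hR
  | [a,b,c,e] => exact hR
  | [a,b,c,e,f] => exact hR
  | aexp :: b :: c :: e :: f :: gg :: h :: rest => exact hR

lemma skill_stage {n m : Nat} : ∀ (skill : List (List Int)) (g : List (List Int)),
    GoodSkill skill n m → Rect g (n + 1) (m + 1) →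
    Rect (skill.foldl applySkillA g) (n + 1) (m + 1) ∧
    ∀ x y : Nat, gcell (skill.foldl applySkillA g) x y = gcell g x y + Csum skill (x : Int) (y : Int) := by
  intro skill
  induction skill with
  | nil => intro g _ hR; exact ⟨hR, by simp [Csum]⟩
  | cons s rest ih =>
    intro g hG hR
    have hs := hG s (by simp)
    have hrest : GoodSkill rest n m := fun s' hmem => hG s' (by simp [hmem])
    obtain ⟨t, x1, y1, x2, y2, d, rfl⟩ : ∃ t x1 y1 x2 y2 d, s = [t, x1, y1, x2, y2, d] := by
      rcases s with _ | ⟨a1, _ | ⟨a2, _ | ⟨a3, _ | ⟨a4, _ | ⟨a5, _ | ⟨a6, _ | ⟨a7, r⟩⟩⟩⟩⟩⟩⟩ <;>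
        simp_all
    simp only [List.getD, List.getElem?_cons_succ, List.getElem?_cons_zero] at hs
    obtain ⟨-, hb1, hb2, hb3, hb4, hb5, hb6⟩ := hs
    simp only [Option.getD_some] at hb1 hb2 hb3 hb4 hb5 hb6
    have hRA := Rect_applySkillA hR [t, x1, y1, x2, y2, d]
    obtain ⟨hRf, hcell⟩ := ih (applySkillA g [t, x1, y1, x2, y2, d]) hrest hRA
    refine ⟨by simpa using hRf, fun x y => ?_⟩
    rw [List.foldl_cons] at *
    rw [hcell x y, gcell_applySkillA hR t x1 y1 x2 y2 d hb1 hb2 hb3 hb4 hb5 hb6 x y]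
    simp [Csum]
    ring

def psum (f : Nat → Int) (j : Nat) : Int := ((List.range (j + 1)).map f).sum

lemma psum_zero (f : Nat → Int) : psum f 0 = f 0 := by simp [psum]

lemma psum_succ (f : Nat → Int) (j : Nat) : psum f (j + 1) = psum f j + f (j + 1) := by
  simp [psum, List.range_succ]; ring

lemma rowAux {N M : Nat} (x : Nat) (f : Nat → Int) :
    ∀ (k t : Nat) (g : List (List Int)), Rect g N M → x < N → t + k < M →
    (∀ j, j ≤ t → gcell g x j = psum f j) →
    (∀ j, t < j → gcell g x j = f j) →
    Rect ((List.range' (t + 1) k).foldl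
        (fun g y => g.modify x (fun r => r.modify y (· + gcell g x (y - 1)))) g) N M ∧
    (∀ x' y, x' ≠ x → gcell ((List.range' (t + 1) k).foldl
        (fun g y => g.modify x (fun r => r.modify y (· + gcell g x (y - 1)))) g) x' y = gcell g x' y) ∧
    (∀ j, j ≤ t + k → gcell ((List.range' (t + 1) k).foldl
        (fun g y => g.modify x (fun r => r.modify y (· + gcell g x (y - 1)))) g) x j = psum f j) ∧
    (∀ j, t + k < j → gcell ((List.range' (t + 1) k).foldl
        (fun g y => g.modify x (fun r => r.modify y (· + gcell g x (y - 1)))) g) x j = f j) := by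
  intro k
  induction k with
  | zero =>
    intro t g hR hx ht hle hgt
    refine ⟨hR, fun _ _ _ => rfl, fun j hj => hle j (by omega), fun j hj => hgt j (by omega)⟩
  | succ k ih =>
    intro t g hR hx ht hle hgt
    rw [List.range'_succ, List.foldl_cons]
    set g1 := g.modify x (fun r => r.modify (t + 1) (· + gcell g x (t + 1 - 1))) with hg1
    have hrowlen : (g.getD x []).length = M := hR.2 x hx
    have hglen : g.length = N := hR.1
    have hcell1 : ∀ x' y', gcell g1 x' y'
        = if x = x' ∧ x' < g.length ∧ t + 1 = y' ∧ y' < (g.getD x' []).length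
          then gcell g x' y' + gcell g x (t + 1 - 1) else gcell g x' y' := by
      intro x' y'; rw [hg1, gcell_modify]
    have hR1 : Rect g1 N M := Rect_modifyRow hR x _ (fun r => List.length_modify ..)
    have hval : gcell g x (t + 1 - 1) = psum f t := by
      simpa using hle t le_rfl
    have hle1 : ∀ j, j ≤ t + 1 → gcell g1 x j = psum f j := by
      intro j hj
      rw [hcell1]
      rcases Nat.lt_or_ge j (t + 1) with hlt | hge
      · rw [if_neg (by omega)]; exact hle j (by omega)
      · have hj1 : j = t + 1 := by omega
        subst hj1
        rw [if_pos ⟨rfl, by omega, rfl, by omega⟩, hval, hgt (t + 1) (by omega), psum_succ]; ring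
    have hgt1 : ∀ j, t + 1 < j → gcell g1 x j = f j := by
      intro j hj; rw [hcell1, if_neg (by omega)]; exact hgt j (by omega)
    obtain ⟨c1, c2, c3, c4⟩ := ih (t + 1) g1 hR1 hx (by omega) hle1 hgt1
    refine ⟨c1, fun x' y hne => ?_, fun j hj => c3 j (by omega), fun j hj => c4 j (by omega)⟩
    rw [c2 x' y hne, hcell1, if_neg (by intro h; exact hne h.1.symm)]

lemma rowPass {N M m : Nat} (hM : m - 1 < M) :
    ∀ (n' : Nat) (g : List (List Int)), Rect g N M → n' ≤ N →
    Rect ((List.range n').foldl (fun g x =>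
        (List.range' 1 (m - 1)).foldl
          (fun g y => g.modify x (fun r => r.modify y (· + gcell g x (y - 1)))) g) g) N M ∧
    (∀ x y : Nat, gcell ((List.range n').foldl (fun g x =>
        (List.range' 1 (m - 1)).foldl
          (fun g y => g.modify x (fun r => r.modify y (· + gcell g x (y - 1)))) g) g) x y
      = if x < n' ∧ y ≤ m - 1 then psum (gcell g x) y else gcell g x y) := by
  intro n'
  induction n' with
  | zero => intro g hR _; exact ⟨hR, fun x y => by simp⟩
  | succ n' ih =>
    intro g hR hn
    obtain ⟨hR1, hval1⟩ := ih g hR (by omega)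
    rw [List.range_succ, List.foldl_append, List.foldl_cons, List.foldl_nil]
    have hrow : ∀ y, gcell ((List.range n').foldl (fun g x =>
        (List.range' 1 (m - 1)).foldl
          (fun g y => g.modify x (fun r => r.modify y (· + gcell g x (y - 1)))) g) g) n' y
        = gcell g n' y := by
      intro y; rw [hval1]; simp
    obtain ⟨c1, c2, c3, c4⟩ := rowAux n' (fun y => gcell g n' y) (m - 1) 0 _ hR1 (by omega) (by omega)
      (fun j hj => by interval_cases j; rw [hrow, psum_zero]) (fun j hj => hrow j)
    refine ⟨c1, fun x y => ?_⟩
    rcases eq_or_ne x n' with rfl | hne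
    · by_cases hy : y ≤ m - 1
      · rw [c3 y (by omega), if_pos ⟨by omega, hy⟩]
      · rw [c4 y (by omega), if_neg (by omega)]
    · rw [c2 x y hne, hval1]
      by_cases hc : x < n' ∧ y ≤ m - 1
      · rw [if_pos hc, if_pos ⟨by omega, hc.2⟩]
      · rw [if_neg hc, if_neg (by omega)]

lemma colAux {N M : Nat} (y : Nat) (f : Nat → Int) :
    ∀ (k t : Nat) (g : List (List Int)), Rect g N M → y < M → t + k < N →
    (∀ i, i ≤ t → gcell g i y = psum f i) →
    (∀ i, t < i → gcell g i y = f i) →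
    Rect ((List.range' (t + 1) k).foldl
        (fun g x => g.modify x (fun r => r.modify y (· + gcell g (x - 1) y))) g) N M ∧
    (∀ x' y', y' ≠ y → gcell ((List.range' (t + 1) k).foldl
        (fun g x => g.modify x (fun r => r.modify y (· + gcell g (x - 1) y))) g) x' y' = gcell g x' y') ∧
    (∀ i, i ≤ t + k → gcell ((List.range' (t + 1) k).foldl
        (fun g x => g.modify x (fun r => r.modify y (· + gcell g (x - 1) y))) g) i y = psum f i) ∧
    (∀ i, t + k < i → gcell ((List.range' (t + 1) k).foldl
        (fun g x => g.modify x (fun r => r.modify y (· + gcell g (x - 1) y))) g) i y = f i) := by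
  intro k
  induction k with
  | zero =>
    intro t g hR hy ht hle hgt
    exact ⟨hR, fun _ _ _ => rfl, fun i hi => hle i (by omega), fun i hi => hgt i (by omega)⟩
  | succ k ih =>
    intro t g hR hy ht hle hgt
    rw [List.range'_succ, List.foldl_cons]
    set g1 := g.modify (t + 1) (fun r => r.modify y (· + gcell g (t + 1 - 1) y)) with hg1
    have hglen : g.length = N := hR.1
    have hcell1 : ∀ x' y', gcell g1 x' y'
        = if t + 1 = x' ∧ x' < g.length ∧ y = y' ∧ y' < (g.getD x' []).length
          then gcell g x' y' + gcell g (t + 1 - 1) y else gcell g x' y' := by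
      intro x' y'; rw [hg1, gcell_modify]
    have hR1 : Rect g1 N M := Rect_modifyRow hR _ _ (fun r => List.length_modify ..)
    have hval : gcell g (t + 1 - 1) y = psum f t := by simpa using hle t le_rfl
    have hle1 : ∀ i, i ≤ t + 1 → gcell g1 i y = psum f i := by
      intro i hi
      rw [hcell1]
      rcases Nat.lt_or_ge i (t + 1) with hlt | hge
      · rw [if_neg (by omega)]; exact hle i (by omega)
      · have hi1 : i = t + 1 := by omega
        subst hi1
        rw [if_pos ⟨rfl, by omega, rfl, by rw [hR.2 (t+1) (by omega)]; omega⟩, hval,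
          hgt (t + 1) (by omega), psum_succ]
        ring
    have hgt1 : ∀ i, t + 1 < i → gcell g1 i y = f i := by
      intro i hi; rw [hcell1, if_neg (by omega)]; exact hgt i (by omega)
    obtain ⟨c1, c2, c3, c4⟩ := ih (t + 1) g1 hR1 hy (by omega) hle1 hgt1
    refine ⟨c1, fun x' y' hne => ?_, fun i hi => c3 i (by omega), fun i hi => c4 i (by omega)⟩
    rw [c2 x' y' hne, hcell1, if_neg (by intro h; exact hne h.2.2.1.symm)]

lemma colPass {N M n : Nat} (hN : n - 1 < N) :
    ∀ (m' : Nat) (g : List (List Int)), Rect g N M → m' ≤ M →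
    Rect ((List.range' 0 m').foldl (fun g y =>
        (List.range' 1 (n - 1)).foldl
          (fun g x => g.modify x (fun r => r.modify y (· + gcell g (x - 1) y))) g) g) N M ∧
    (∀ x y : Nat, gcell ((List.range' 0 m').foldl (fun g y =>
        (List.range' 1 (n - 1)).foldl
          (fun g x => g.modify x (fun r => r.modify y (· + gcell g (x - 1) y))) g) g) x y
      = if y < m' ∧ x ≤ n - 1 then psum (fun i => gcell g i y) x else gcell g x y) := by
  intro m'
  induction m' with
  | zero => intro g hR _; exact ⟨hR, fun x y => by simp⟩
  | succ m' ih =>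
    intro g hR hm
    obtain ⟨hR1, hval1⟩ := ih g hR (by omega)
    rw [List.range'_1_concat, Nat.zero_add, List.foldl_append, List.foldl_cons, List.foldl_nil]
    have hcol : ∀ i, gcell ((List.range' 0 m').foldl (fun g y =>
        (List.range' 1 (n - 1)).foldl
          (fun g x => g.modify x (fun r => r.modify y (· + gcell g (x - 1) y))) g) g) i m'
        = gcell g i m' := by
      intro i; rw [hval1]; simp
    obtain ⟨c1, c2, c3, c4⟩ := colAux m' (fun i => gcell g i m') (n - 1) 0 _ hR1 (by omega) (by omega)
      (fun i hi => by interval_cases i; rw [hcol, psum_zero]) (fun i hi => hcol i)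
    refine ⟨c1, fun x y => ?_⟩
    rcases eq_or_ne y m' with rfl | hne
    · by_cases hx : x ≤ n - 1
      · rw [c3 x (by omega), if_pos ⟨by omega, hx⟩]
      · rw [c4 x (by omega), if_neg (by omega)]
    · rw [c2 x y hne, hval1]
      by_cases hc : y < m' ∧ x ≤ n - 1
      · rw [if_pos hc, if_pos ⟨by omega, hc.2⟩]
      · rw [if_neg hc, if_neg (by omega)]

lemma psum_const_zero (x : Nat) : psum (fun _ => (0 : Int)) x = 0 := by simp [psum]

lemma psum_add (p q : Nat → Int) (x : Nat) :
    psum (fun i => p i + q i) x = psum p x + psum q x := by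
  induction x with
  | zero => simp [psum_zero]
  | succ x ih => rw [psum_succ, psum_succ, psum_succ, ih]; ring

lemma psum_ite (a v : Int) (x : Nat) :
    psum (fun i => if (i : Int) = a then v else 0) x = if 0 ≤ a ∧ a ≤ (x : Int) then v else 0 := by
  induction x with
  | zero => rw [psum_zero]; split_ifs <;> omega
  | succ x ih => rw [psum_succ, ih]; push_cast; split_ifs <;> omega

lemma psum2_ite (a b v : Int) (x y : Nat) :
    psum (fun i => psum (fun j => if (i : Int) = a ∧ (j : Int) = b then v else 0) y) x
      = if 0 ≤ a ∧ a ≤ (x : Int) ∧ 0 ≤ b ∧ b ≤ (y : Int) then v else 0 := by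
  have h1 : ∀ i : Nat, psum (fun j => if (i : Int) = a ∧ (j : Int) = b then v else 0) y
      = if (i : Int) = a then (if 0 ≤ b ∧ b ≤ (y : Int) then v else 0) else 0 := by
    intro i
    by_cases hi : (i : Int) = a
    · rw [if_pos hi]
      have he : (fun j : Nat => if (i : Int) = a ∧ (j : Int) = b then v else 0)
          = fun j : Nat => if (j : Int) = b then v else 0 := funext fun j => by simp [hi]
      rw [he, psum_ite]
    · rw [if_neg hi]
      have he : (fun j : Nat => if (i : Int) = a ∧ (j : Int) = b then v else 0)
          = fun _ : Nat => (0 : Int) := funext fun j => by simp [hi]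
      rw [he, psum_const_zero]
  simp only [h1]
  rw [psum_ite]
  split_ifs <;> omega

lemma psum2_corner (t x1 y1 x2 y2 d : Int) (n m : Nat)
    (h1 : 0 ≤ x1) (h2 : x1 ≤ x2) (h3 : x2 < (n : Int))
    (h4 : 0 ≤ y1) (h5 : y1 ≤ y2) (h6 : y2 < (m : Int)) (x y : Nat) :
    psum (fun i => psum (fun j => corner [t, x1, y1, x2, y2, d] (i : Int) (j : Int)) y) x
      = rectC [t, x1, y1, x2, y2, d] (x : Int) (y : Int) := by
  simp only [corner]
  have hsplit : ∀ i : Nat,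
      psum (fun j => (if (i:Int) = x1 ∧ (j:Int) = y1 then (if t = 1 then -d else d) else 0)
        + (if (i:Int) = x1 ∧ (j:Int) = y2 + 1 then -(if t = 1 then -d else d) else 0)
        + (if (i:Int) = x2 + 1 ∧ (j:Int) = y1 then -(if t = 1 then -d else d) else 0)
        + (if (i:Int) = x2 + 1 ∧ (j:Int) = y2 + 1 then (if t = 1 then -d else d) else 0)) y
      = psum (fun j => if (i:Int) = x1 ∧ (j:Int) = y1 then (if t = 1 then -d else d) else 0) y
        + psum (fun j => if (i:Int) = x1 ∧ (j:Int) = y2 + 1 then -(if t = 1 then -d else d) else 0) y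
        + psum (fun j => if (i:Int) = x2 + 1 ∧ (j:Int) = y1 then -(if t = 1 then -d else d) else 0) y
        + psum (fun j => if (i:Int) = x2 + 1 ∧ (j:Int) = y2 + 1 then (if t = 1 then -d else d) else 0) y := by
    intro i
    rw [← psum_add, ← psum_add, ← psum_add]
  simp only [hsplit, psum_add]
  rw [psum2_ite, psum2_ite, psum2_ite, psum2_ite]
  simp only [rectC]
  set dd := (if t = 1 then -d else d) with hdd
  split_ifs <;> omega

lemma Csum_cons (s : List Int) (rest : List (List Int)) (x y : Int) :
    Csum (s :: rest) x y = corner s x y + Csum rest x y := by simp [Csum]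

lemma psum2_Csum {n m : Nat} : ∀ (skill : List (List Int)), GoodSkill skill n m → ∀ (x y : Nat),
    psum (fun i => psum (fun j => Csum skill (i : Int) (j : Int)) y) x
      = Fsum skill (x : Int) (y : Int) := by
  intro skill
  induction skill with
  | nil =>
    intro _ x y
    simp only [Csum, Fsum, List.map_nil, List.sum_nil]
    simp only [psum_const_zero]
  | cons s rest ih =>
    intro hG x y
    have hs := hG s (by simp)
    have hrest : GoodSkill rest n m := fun s' hmem => hG s' (by simp [hmem])
    obtain ⟨t, x1, y1, x2, y2, d, rfl⟩ : ∃ t x1 y1 x2 y2 d, s = [t, x1, y1, x2, y2, d] := by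
      rcases s with _ | ⟨a1, _ | ⟨a2, _ | ⟨a3, _ | ⟨a4, _ | ⟨a5, _ | ⟨a6, _ | ⟨a7, r⟩⟩⟩⟩⟩⟩⟩ <;>
        simp_all
    simp only [List.getD, List.getElem?_cons_succ, List.getElem?_cons_zero] at hs
    obtain ⟨-, hb1, hb2, hb3, hb4, hb5, hb6⟩ := hs
    simp only [Option.getD_some] at hb1 hb2 hb3 hb4 hb5 hb6
    have hc : ∀ i : Nat, (fun j : Nat => Csum ([t,x1,y1,x2,y2,d] :: rest) (i : Int) (j : Int))
        = fun j : Nat => corner [t,x1,y1,x2,y2,d] (i : Int) (j : Int) + Csum rest (i : Int) (j : Int) :=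
      fun i => funext fun j => Csum_cons ..
    simp only [hc, psum_add]
    rw [ih hrest x y, psum2_corner t x1 y1 x2 y2 d n m hb1 hb2 hb3 hb4 hb5 hb6 x y]
    simp [Fsum]

lemma psum_congr {p q : Nat → Int} {x : Nat} (h : ∀ i, i ≤ x → p i = q i) : psum p x = psum q x := by
  induction x with
  | zero => rw [psum_zero, psum_zero, h 0 le_rfl]
  | succ x ih =>
    rw [psum_succ, psum_succ, ih (fun i hi => h i (by omega)), h (x + 1) le_rfl]

lemma innerCountA (G : List (List Int)) (n m x : Nat) (f : Nat → Int) :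
    ∀ (k t : Nat) (b : List (List Int)) (a : Int),
    b.length = n → x < n → (∀ x', x' < n → m ≤ (b.getD x' []).length) → t + k ≤ m →
    (∀ j, t ≤ j → gcell b x j = f j) →
    ((List.range' t k).foldl (fun (st : List (List Int) × Int) y =>
        (st.1.modify x (fun r => r.modify y (· + gcell G x y)),
         if 0 < gcell (st.1.modify x (fun r => r.modify y (· + gcell G x y))) x y
         then st.2 + 1 else st.2)) (b, a)).2
      = a + ((List.range' t k).map (fun j => if 0 < f j + gcell G x j then (1 : Int) else 0)).sum ∧
    ((List.range' t k).foldl (fun (st : List (List Int) × Int) y =>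
        (st.1.modify x (fun r => r.modify y (· + gcell G x y)),
         if 0 < gcell (st.1.modify x (fun r => r.modify y (· + gcell G x y))) x y
         then st.2 + 1 else st.2)) (b, a)).1.length = n ∧
    (∀ x', x' < n → m ≤ (((List.range' t k).foldl (fun (st : List (List Int) × Int) y =>
        (st.1.modify x (fun r => r.modify y (· + gcell G x y)),
         if 0 < gcell (st.1.modify x (fun r => r.modify y (· + gcell G x y))) x y
         then st.2 + 1 else st.2)) (b, a)).1.getD x' []).length) ∧
    (∀ x' y, x' ≠ x → gcell (((List.range' t k).foldl (fun (st : List (List Int) × Int) y =>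
        (st.1.modify x (fun r => r.modify y (· + gcell G x y)),
         if 0 < gcell (st.1.modify x (fun r => r.modify y (· + gcell G x y))) x y
         then st.2 + 1 else st.2)) (b, a)).1) x' y = gcell b x' y) := by
  intro k
  induction k with
  | zero =>
    intro t b a h1 h2 h3 h4 h5
    exact ⟨by simp, h1, h3, fun _ _ _ => rfl⟩
  | succ k ih =>
    intro t b a h1 h2 h3 h4 h5
    rw [List.range'_succ]
    simp only [List.foldl_cons, List.map_cons, List.sum_cons]
    set b1 := b.modify x (fun r => r.modify t (· + gcell G x t)) with hb1
    have hcell1 : ∀ x' y', gcell b1 x' y'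
        = if x = x' ∧ x' < b.length ∧ t = y' ∧ y' < (b.getD x' []).length
          then gcell b x' y' + gcell G x t else gcell b x' y' := by
      intro x' y'; rw [hb1, gcell_modify]
    have hlen1 : b1.length = n := by rw [hb1, List.length_modify, h1]
    have hrow1 : ∀ x', x' < n → m ≤ (b1.getD x' []).length := by
      intro x' hx'
      rw [hb1, getD_modify' ([]) b x _ x']
      split
      · rw [List.length_modify]; exact h3 x' hx'
      · exact h3 x' hx'
    have hxt : gcell b1 x t = f t + gcell G x t := by
      rw [hcell1, if_pos ⟨rfl, by omega, rfl, by have := h3 x h2; omega⟩, h5 t le_rfl]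
    have hagree1 : ∀ j, t + 1 ≤ j → gcell b1 x j = f j := by
      intro j hj; rw [hcell1, if_neg (by omega)]; exact h5 j (by omega)
    obtain ⟨c1, c2, c3, c4⟩ := ih (t + 1) b1 (if 0 < gcell b1 x t then a + 1 else a)
      hlen1 h2 hrow1 (by omega) hagree1
    refine ⟨?_, c2, c3, fun x' y hne => by
      rw [c4 x' y hne, hcell1, if_neg (by intro h; exact hne h.1.symm)]⟩
    rw [c1, hxt]
    split_ifs <;> ring

lemma outerCountA (G board0 : List (List Int)) (n m : Nat)
    (hn : board0.length = n) (hrow : ∀ x', x' < n → m ≤ (board0.getD x' []).length) :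
    ∀ (n' : Nat), n' ≤ n →
    ((List.range n').foldl (fun (st : List (List Int) × Int) x =>
        (List.range' 0 m).foldl (fun (st : List (List Int) × Int) y =>
          (st.1.modify x (fun r => r.modify y (· + gcell G x y)),
           if 0 < gcell (st.1.modify x (fun r => r.modify y (· + gcell G x y))) x y
           then st.2 + 1 else st.2)) st) (board0, 0)).2
      = ((List.range n').map (fun x => ((List.range' 0 m).map
          (fun j => if 0 < gcell board0 x j + gcell G x j then (1 : Int) else 0)).sum)).sum ∧
    ((List.range n').foldl (fun (st : List (List Int) × Int) x =>
        (List.range' 0 m).foldl (fun (st : List (List Int) × Int) y =>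
          (st.1.modify x (fun r => r.modify y (· + gcell G x y)),
           if 0 < gcell (st.1.modify x (fun r => r.modify y (· + gcell G x y))) x y
           then st.2 + 1 else st.2)) st) (board0, 0)).1.length = n ∧
    (∀ x', x' < n → m ≤ ((((List.range n').foldl (fun (st : List (List Int) × Int) x =>
        (List.range' 0 m).foldl (fun (st : List (List Int) × Int) y =>
          (st.1.modify x (fun r => r.modify y (· + gcell G x y)),
           if 0 < gcell (st.1.modify x (fun r => r.modify y (· + gcell G x y))) x y
           then st.2 + 1 else st.2)) st) (board0, 0)).1).getD x' []).length) ∧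
    (∀ x' y, n' ≤ x' → gcell (((List.range n').foldl (fun (st : List (List Int) × Int) x =>
        (List.range' 0 m).foldl (fun (st : List (List Int) × Int) y =>
          (st.1.modify x (fun r => r.modify y (· + gcell G x y)),
           if 0 < gcell (st.1.modify x (fun r => r.modify y (· + gcell G x y))) x y
           then st.2 + 1 else st.2)) st) (board0, 0)).1) x' y = gcell board0 x' y) := by
  intro n'
  induction n' with
  | zero => exact fun _ => ⟨by simp, hn, hrow, fun _ _ _ => rfl⟩
  | succ n' ih =>
    intro hn'
    obtain ⟨c1, c2, c3, c4⟩ := ih (by omega)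
    rw [List.range_succ]
    simp only [List.foldl_append, List.foldl_cons, List.foldl_nil, List.map_append,
      List.map_cons, List.map_nil, List.sum_append, List.sum_cons, List.sum_nil]
    set P := ((List.range n').foldl (fun (st : List (List Int) × Int) x =>
        (List.range' 0 m).foldl (fun (st : List (List Int) × Int) y =>
          (st.1.modify x (fun r => r.modify y (· + gcell G x y)),
           if 0 < gcell (st.1.modify x (fun r => r.modify y (· + gcell G x y))) x y
           then st.2 + 1 else st.2)) st) (board0, 0)) with hP
    have hPeta : P = (P.1, P.2) := rfl
    have hfr : ∀ j, (0:Nat) ≤ j → gcell P.1 n' j = gcell board0 n' j :=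
      fun j _ => c4 n' j le_rfl
    obtain ⟨d1, d2, d3, d4⟩ := innerCountA G n m n' (fun j => gcell board0 n' j) m 0 P.1 P.2
      c2 (by omega) c3 (by omega) hfr
    rw [hPeta]
    exact ⟨by rw [d1, c1]; ring, d2, d3,
      fun x' y hx' => by rw [d4 x' y (by omega), c4 x' y (by omega)]⟩

lemma deltaSum_aux (x y : Int) : ∀ (skill : List (List Int)) (a : Int),
    skill.foldl (fun a s =>
      match s with
      | [t, x1, y1, x2, y2, d] =>
          if x1 ≤ x ∧ x ≤ x2 ∧ y1 ≤ y ∧ y ≤ y2 then a + (if t = 1 then -d else d) else a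
      | _ => a) a = a + Fsum skill x y := by
  intro skill
  induction skill with
  | nil => intro a; simp [Fsum]
  | cons s rest ih =>
    intro a
    rw [List.foldl_cons, ih]
    have hf : Fsum (s :: rest) x y = rectC s x y + Fsum rest x y := by simp [Fsum]
    rw [hf]
    rcases s with _ | ⟨a1, _ | ⟨a2, _ | ⟨a3, _ | ⟨a4, _ | ⟨a5, _ | ⟨a6, _ | ⟨a7, r⟩⟩⟩⟩⟩⟩⟩ <;>
      simp only [rectC] <;> try ring
    split_ifs <;> ring

lemma deltaSum_eq_Fsum (skill : List (List Int)) (x y : Int) :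
    deltaSum skill x y = Fsum skill x y := by
  rw [deltaSum, deltaSum_aux]; ring

lemma innerCountB (skill : List (List Int)) (m : Nat) (X : Int) (f : Nat → Int) :
    ∀ (k t : Nat) (row : List Int) (acc : Int), m ≤ row.length → t + k ≤ m →
    (∀ j, t ≤ j → row.getD j 0 = f j) →
    ((List.range' t k).foldl (fun (st : List Int × Int) y =>
        (st.1.modify y (· + deltaSum skill X (y : Int)),
         if 0 < (st.1.modify y (· + deltaSum skill X (y : Int))).getD y 0
         then st.2 + 1 else st.2)) (row, acc)).2
      = acc + ((List.range' t k).map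
          (fun j => if 0 < f j + deltaSum skill X (j : Int) then (1 : Int) else 0)).sum := by
  intro k
  induction k with
  | zero => intro t row acc _ _ _; simp
  | succ k ih =>
    intro t row acc hm hk hf
    rw [List.range'_succ]
    simp only [List.foldl_cons, List.map_cons, List.sum_cons]
    set r1 := row.modify t (· + deltaSum skill X (t : Int)) with hr1
    have hcell : ∀ j, r1.getD j 0 = if t = j ∧ j < row.length
        then row.getD j 0 + deltaSum skill X (t : Int) else row.getD j 0 := by
      intro j; rw [hr1]; exact getD_modify' 0 row t _ j
    have hlen : m ≤ r1.length := by rw [hr1, List.length_modify]; exact hm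
    have ht : r1.getD t 0 = f t + deltaSum skill X (t : Int) := by
      rw [hcell, if_pos ⟨rfl, by omega⟩, hf t le_rfl]
    have hf1 : ∀ j, t + 1 ≤ j → r1.getD j 0 = f j := by
      intro j hj; rw [hcell, if_neg (by omega)]; exact hf j (by omega)
    rw [ih (t + 1) r1 (if 0 < r1.getD t 0 then acc + 1 else acc) hlen (by omega) hf1, ht]
    split_ifs <;> ring

lemma outerCountB (skill : List (List Int)) (m : Nat) :
    ∀ (bs : List (List Int)) (s acc : Int), (∀ row ∈ bs, m ≤ row.length) →
    ((PySem.List.enumerate bs s).foldl (fun (answer : Int) p =>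
      ((List.range' 0 m).foldl (fun (st : List Int × Int) y =>
        (st.1.modify y (· + deltaSum skill p.1 (y : Int)),
         if 0 < (st.1.modify y (· + deltaSum skill p.1 (y : Int))).getD y 0
         then st.2 + 1 else st.2)) (p.2, answer)).2) acc)
      = acc + ((List.range bs.length).map (fun k => ((List.range' 0 m).map
          (fun j => if 0 < ((bs.getD k []).getD j 0) + deltaSum skill (s + (k : Int)) (j : Int)
            then (1 : Int) else 0)).sum)).sum := by
  intro bs
  induction bs with
  | nil => intro s acc _; simp [PySem.List.enumerate]
  | cons r rest ih =>
    intro s acc hrow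
    rw [PySem.List.enumerate_cons, List.foldl_cons]
    have h1 := innerCountB skill m s (fun j => r.getD j 0) m 0 r acc
      (hrow r (by simp)) (by omega) (fun j _ => rfl)
    rw [h1, ih (s + 1) _ (fun row hm => hrow row (by simp [hm]))]
    rw [List.length_cons, List.range_succ_eq_map]
    simp only [List.map_cons, List.sum_cons, List.map_map]
    have hre : ∀ k : Nat, ((fun k : Nat => ((List.range' 0 m).map
          (fun j => if 0 < (((r :: rest).getD k []).getD j 0) + deltaSum skill (s + (k : Int)) (j : Int)
            then (1 : Int) else 0)).sum) ∘ Nat.succ) k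
        = (fun k : Nat => ((List.range' 0 m).map
          (fun j => if 0 < ((rest.getD k []).getD j 0) + deltaSum skill (s + 1 + (k : Int)) (j : Int)
            then (1 : Int) else 0)).sum) k := by
      intro k
      simp only [Function.comp_apply, List.getD_cons_succ]
      have : s + ((k + 1 : Nat) : Int) = s + 1 + (k : Int) := by push_cast; ring
      rw [this]
    rw [List.map_congr_left (fun k _ => hre k)]
    simp only [List.getD_cons_zero, Nat.cast_zero, add_zero]
    ring

theorem main_equiv (board skill : List (List Int))
    (hne : board ≠ [])
    (hrows : ∀ row ∈ board, (board.headD []).length ≤ row.length)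
    (hG : GoodSkill skill board.length (board.headD []).length) :
    solution board skill = solution_alt board skill := by
  set n := board.length with hn
  set m := (board.headD []).length with hm
  have hn1 : 1 ≤ n := List.length_pos_iff.mpr hne
  have hrow : ∀ x, x < n → m ≤ (board.getD x []).length := by
    intro x hx
    refine hrows _ ?_
    rw [List.getD_eq_getElem?_getD, List.getElem?_eq_getElem hx]
    exact List.getElem_mem _
  simp only [solution, solution_alt]
  rw [show List.range m = List.range' 0 m from List.range_eq_range']
  -- name the four mapping stages
  set M0 : List (List Int) := List.replicate (n + 1) (List.replicate (m + 1) (0 : Int)) with hM0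
  set M1 := skill.foldl applySkillA M0 with hM1
  set M2 := (List.range n).foldl (fun g x =>
      (List.range' 1 (m - 1)).foldl
        (fun g y => g.modify x (fun r => r.modify y (· + gcell g x (y - 1)))) g) M1 with hM2
  set M3 := (List.range' 0 m).foldl (fun g y =>
      (List.range' 1 (n - 1)).foldl
        (fun g x => g.modify x (fun r => r.modify y (· + gcell g (x - 1) y))) g) M2 with hM3
  have hR0 : Rect M0 (n + 1) (m + 1) := by
    constructor
    · simp [hM0]
    · intro i hi
      rw [hM0, List.getD_eq_getElem?_getD, List.getElem?_replicate]
      simp [hi]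
  have h0 : ∀ x y : Nat, gcell M0 x y = 0 := by
    intro x y
    simp only [gcell, hM0, List.getD_eq_getElem?_getD, List.getElem?_replicate]
    by_cases hx : x < n + 1 <;> by_cases hy : y < m + 1 <;> simp [hx, hy]
  obtain ⟨hR1, hv1⟩ := skill_stage skill M0 hG hR0
  obtain ⟨hR2, hv2⟩ := rowPass (show m - 1 < m + 1 by omega) n M1 hR1 (by omega)
  obtain ⟨hR3, hv3⟩ := colPass (show n - 1 < n + 1 by omega) m M2 hR2 (by omega)
  have hM3v : ∀ x j : Nat, x < n → j < m → gcell M3 x j = Fsum skill (x : Int) (j : Int) := by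
    intro x j hx hj
    rw [hv3 x j, if_pos ⟨hj, by omega⟩]
    have e1 : ∀ i, i ≤ x → gcell M2 i j = psum (fun j' => Csum skill (i : Int) (j' : Int)) j := by
      intro i hi
      rw [hv2 i j, if_pos ⟨by omega, by omega⟩]
      exact psum_congr (fun j' hj' => by rw [hv1 i j', h0, zero_add])
    rw [psum_congr e1, psum2_Csum skill hG x j]
  obtain ⟨cA, -, -, -⟩ := outerCountA M3 board n m hn.symm hrow n le_rfl
  rw [cA, outerCountB skill m board 0 0 hrows, zero_add, ← hn]
  refine congrArg List.sum (List.map_congr_left ?_)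
  intro x hx
  have hx' : x < n := List.mem_range.mp hx
  refine congrArg List.sum (List.map_congr_left ?_)
  intro j hj
  have hj' : j < m := by
    rw [List.mem_range'_1] at hj
    omega
  rw [hM3v x j hx' hj', ← deltaSum_eq_Fsum, zero_add]
  rfl

-- ===== VERDICT (by name: the statement is the Claim_ definition above) =====
theorem solution_spec : Claim_equal_solution := by
  intro board skill _ hPre
  obtain ⟨hne, hrows, hsk⟩ := hPre
  show solution board skill = solution_alt board skill
  exact main_equiv board skill hne hrows hsk
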